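-- pv_equiv track=rewrite | github.com/JBRS307/WDI | kolosy/2022-23/zad1.1.py | find_substrs
-- ===== SOURCE A (Python) =====
-- def find_substrs(arr):
--     leng = len(arr)
--
--     beg = 0
--     end = 0
--     min_end = float('inf')
--     max_beg = 0
--     str_leng = 1
--     for i in range(1, leng):
--         if arr[i] <= arr[i-1]:
--             if str_leng > 2:
--                 min_end = min(min_end, arr[end])
--                 max_beg = max(max_beg, arr[beg])
--             beg = i
--             end = i
--             str_leng = 1
--         else:
--             end += 1
--             str_leng += 1
--
--     if str_leng > 2:
--         min_end = min(min_end, arr[end])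
--         max_beg = max(max_beg, arr[beg])
--
--     return True if max_beg > min_end else False
-- ===== SOURCE B (Python) =====
-- def find_substrs(arr):
--     n = len(arr)
--     # boolean "rise" array: up[i] == True iff position i continues a strict increase
--     up = [i > 0 and arr[i] > arr[i - 1] for i in range(n)]
--     # a position i starts a qualifying run iff no rise into it and two rises after it
--     starts = [arr[i] for i in range(n)
--               if not up[i] and i + 2 < n and up[i + 1] and up[i + 2]]
--     # a position k ends a qualifying run iff two rises into it and no rise out of it
--     ends = [arr[k] for k in range(n)
--             if up[k] and up[k - 1] and (k == n - 1 or not up[k + 1])]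
--     if not ends:
--         return False
--     return min(ends) < max([0] + starts)
-- ===== Notes on version B (the rewrite author's own statement) =====
-- stated objective: alternative
-- what changed: A's stateful single loop tracking (beg, end, min_end, max_beg, str_leng) is replaced by a position-local formulation: build a boolean rise array up of arr, select qualifying run starts and run ends by O(1) neighbour-window predicates (two filters, no run-tracking state), then compare the minimum of the end values with the maximum of the start values seeded with 0.
import Mathlib
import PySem

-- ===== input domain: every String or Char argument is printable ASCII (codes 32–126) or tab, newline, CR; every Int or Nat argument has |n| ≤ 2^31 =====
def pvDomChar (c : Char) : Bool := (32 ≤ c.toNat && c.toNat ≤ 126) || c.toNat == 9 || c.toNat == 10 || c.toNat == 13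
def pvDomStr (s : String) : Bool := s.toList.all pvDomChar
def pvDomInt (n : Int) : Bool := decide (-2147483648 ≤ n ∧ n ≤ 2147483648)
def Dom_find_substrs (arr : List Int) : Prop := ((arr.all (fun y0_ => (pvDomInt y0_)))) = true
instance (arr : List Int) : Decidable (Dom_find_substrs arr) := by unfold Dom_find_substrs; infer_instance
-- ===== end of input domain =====

-- B replaces A's stateful run-tracking loop by a local-window formulation: a boolean
-- "rise" array, run-start/run-end positions selected by O(1) neighbour predicates, then min/max; same cost, alternative structure.

-- ===== PORT A =====
-- float('inf') only ever meets ints here: model min_end as Option Int, none = inf.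
def minInf (o : Option Int) (x : Int) : Option Int :=
  match o with
  | none => some x
  | some m => some (min m x)

-- 'max_beg > min_end' with min_end possibly inf
def gtInf (maxB : Int) (o : Option Int) : Bool :=
  match o with
  | none => false
  | some m => decide (m < maxB)

-- loop body of A, state (beg, end, min_end, max_beg, str_leng)
def findA_step (arr : List Int) (s : Int × Int × Option Int × Int × Int) (i : Int) :
    Int × Int × Option Int × Int × Int :=
  match s with
  | (beg, en, minE, maxB, strL) =>
    if PySem.List.pyGetD arr i 0 ≤ PySem.List.pyGetD arr (i - 1) 0 then
      if strL > 2 then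
        (i, i, minInf minE (PySem.List.pyGetD arr en 0), max maxB (PySem.List.pyGetD arr beg 0), 1)
      else (i, i, minE, maxB, 1)
    else (beg, en + 1, minE, maxB, strL + 1)

-- the code after the loop
def findA_final (arr : List Int) (s : Int × Int × Option Int × Int × Int) : Bool :=
  match s with
  | (beg, en, minE, maxB, strL) =>
    let minE := if strL > 2 then minInf minE (PySem.List.pyGetD arr en 0) else minE
    let maxB := if strL > 2 then max maxB (PySem.List.pyGetD arr beg 0) else maxB
    gtInf maxB minE

def find_substrs (arr : List Int) : Bool :=
  let leng : Int := (arr.length : Int)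
  findA_final arr
    ((PySem.List.pyRange 1 leng 1).foldl (findA_step arr) (0, 0, none, 0, 1))

-- ===== PORT B =====
-- up = [i > 0 and arr[i] > arr[i-1] for i in range(n)]
def upList (arr : List Int) : List Bool :=
  (PySem.List.pyRange 0 (arr.length : Int) 1).map (fun i =>
    decide (0 < i) && decide (PySem.List.pyGetD arr (i - 1) 0 < PySem.List.pyGetD arr i 0))

-- up[j] (only read where the Python guard has already decided the result or j is in range)
def uget (u : List Bool) (j : Int) : Bool := PySem.List.pyGetD u j false

def find_substrs_alt (arr : List Int) : Bool :=
  let n : Int := (arr.length : Int)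
  let u := upList arr
  let starts : List Int := ((PySem.List.pyRange 0 n 1).filter (fun i =>
      !uget u i && decide (i + 2 < n) && uget u (i + 1) && uget u (i + 2))).map
      (fun i => PySem.List.pyGetD arr i 0)
  let ends : List Int := ((PySem.List.pyRange 0 n 1).filter (fun k =>
      uget u k && uget u (k - 1) && (decide (k = n - 1) || !uget u (k + 1)))).map
      (fun k => PySem.List.pyGetD arr k 0)
  match ends with
  | [] => false
  | e :: es => decide (es.foldl min e < starts.foldl max 0)

-- ===== PRECONDITION & SPEC =====
def Spec_find_substrs (arr : List Int) (out : Bool) : Prop := out = find_substrs_alt arr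
instance (arr : List Int) (out : Bool) : Decidable (Spec_find_substrs arr out) := by unfold Spec_find_substrs; infer_instance

-- ===== CLAIM (what is proved, stated in full; the proofs are below) =====
def Claim_equal_find_substrs : Prop := ∀ (arr : List Int), Dom_find_substrs arr → Spec_find_substrs arr (find_substrs arr)

-- ===== LEMMAS AND PROOFS =====

-- Nat-indexed view of the rise array
def upF (arr : List Int) (i : Nat) : Bool := uget (upList arr) (i : Int)

-- B's two filter predicates at a Nat position
def sCond (arr : List Int) (i : Nat) : Bool :=
  !upF arr i && decide ((i : Int) + 2 < (arr.length : Int)) && upF arr (i + 1) && upF arr (i + 2)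

def eCond (arr : List Int) (k : Nat) : Bool :=
  upF arr k && uget (upList arr) ((k : Int) - 1) &&
    (decide ((k : Int) = (arr.length : Int) - 1) || !upF arr (k + 1))

-- values of start/end positions inside a window of positions
def sVals (arr : List Int) (s cnt : Nat) : List Int :=
  ((List.range' s cnt).filter (sCond arr)).map (fun (i : Nat) => PySem.List.pyGetD arr (i : Int) 0)

def eVals (arr : List Int) (s cnt : Nat) : List Int :=
  ((List.range' s cnt).filter (eCond arr)).map (fun (i : Nat) => PySem.List.pyGetD arr (i : Int) 0)

theorem upF_eq_of_lt {arr : List Int} {i : Nat} (h : i < arr.length) :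
    upF arr i = (decide (0 < (i : Int)) &&
      decide (PySem.List.pyGetD arr ((i : Int) - 1) 0 < PySem.List.pyGetD arr (i : Int) 0)) := by
  unfold upF uget upList
  exact PySem.List.pyGetD_map_pyRange _ _ _ _ h

theorem upF_ge {arr : List Int} {i : Nat} (h : arr.length ≤ i) : upF arr i = false := by
  unfold upF uget upList
  rw [PySem.List.pyGetD_natCast, List.getD_eq_default]
  simp [PySem.List.length_pyRange_one]
  omega

theorem upF_zero (arr : List Int) : upF arr 0 = false := by
  rcases Nat.eq_zero_or_pos arr.length with h | h
  · exact upF_ge (by omega)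
  · rw [upF_eq_of_lt h]; simp

-- [e].foldl and minInf bookkeeping
theorem foldl_minInf_some (l : List Int) (e : Int) :
    l.foldl minInf (some e) = some (l.foldl min e) := by
  induction l generalizing e with
  | nil => rfl
  | cons x t ih => rw [List.foldl_cons, show minInf (some e) x = some (min e x) from rfl, ih, List.foldl_cons]

-- inside a maximal run no position is a start (the leading !up[i] fails)
theorem filter_sCond_run {arr : List Int} {s m : Nat}
    (h : ∀ i, s ≤ i → i < s + m → upF arr i = true) :
    (List.range' s m).filter (sCond arr) = [] := by
  rw [List.filter_eq_nil_iff]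
  intro i hi
  rw [List.mem_range'_1] at hi
  simp [sCond, h i hi.1 hi.2]

theorem sVals_split (arr : List Int) (beg j n : Nat) (hbj : beg < j) (hjn : j ≤ n)
    (hrun : ∀ i, beg < i → i < j → upF arr i = true) :
    sVals arr beg (n - beg)
      = (if sCond arr beg then [PySem.List.pyGetD arr (beg : Int) 0] else []) ++ sVals arr j (n - j) := by
  unfold sVals
  have hsplit : List.range' beg (n - beg) = List.range' beg (j - beg) ++ List.range' j (n - j) := by
    have := List.range'_append_1 (s := beg) (m := j - beg) (n := n - j)
    rw [show beg + (j - beg) = j by omega] at this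
    rw [show n - beg = j - beg + (n - j) by omega, ← this]
  rw [hsplit, List.filter_append, List.map_append]
  congr 1
  have hpeel : List.range' beg (j - beg) = beg :: List.range' (beg + 1) (j - beg - 1) := by
    rw [show j - beg = (j - beg - 1) + 1 by omega, List.range'_succ]
    simp
  rw [hpeel, List.filter_cons, filter_sCond_run (s := beg + 1) (m := j - beg - 1)
      (fun i h1 h2 => hrun i (by omega) (by omega))]
  split_ifs <;> simp

theorem eVals_peel (arr : List Int) (j n : Nat) (h1 : 1 ≤ j) (hjn : j ≤ n) :
    eVals arr (j - 1) (n - (j - 1))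
      = (if eCond arr (j - 1) then [PySem.List.pyGetD arr ((j - 1 : Nat) : Int) 0] else []) ++ eVals arr j (n - j) := by
  unfold eVals
  rw [show n - (j - 1) = (n - j) + 1 by omega, List.range'_succ, show j - 1 + 1 = j by omega,
    List.filter_cons]
  split_ifs <;> simp

-- the run's first position is a start iff the run has length >= 3 (break known at j)
theorem sCond_begin {arr : List Int} {beg j : Nat} (hbeg : beg < j) (hjn : j ≤ arr.length)
    (hub : upF arr beg = false) (hrun : ∀ i, beg < i → i < j → upF arr i = true)
    (hbreak : j = arr.length ∨ upF arr j = false) :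
    sCond arr beg = decide (3 ≤ j - beg) := by
  by_cases h3 : 3 ≤ j - beg
  · have h1 : upF arr (beg + 1) = true := hrun _ (by omega) (by omega)
    have h2 : upF arr (beg + 2) = true := hrun _ (by omega) (by omega)
    have hlt : ((beg : Int) + 2 < (arr.length : Int)) := by omega
    simp [sCond, hub, h1, h2, hlt, h3]
  · have hlen : j - beg = 1 ∨ j - beg = 2 := by omega
    rcases hlen with hl | hl
    · rcases hbreak with hb | hb
      · have hge : ¬ ((beg : Int) + 2 < (arr.length : Int)) := by omega
        simp [sCond, hge, h3]
      · have h1 : upF arr (beg + 1) = false := by rwa [show beg + 1 = j by omega]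
        simp [sCond, h1, h3]
    · rcases hbreak with hb | hb
      · have hge : ¬ ((beg : Int) + 2 < (arr.length : Int)) := by omega
        simp [sCond, hge, h3]
      · have h2 : upF arr (beg + 2) = false := by rwa [show beg + 2 = j by omega]
        simp [sCond, h2, h3]

-- the run's last position is an end iff the run has length >= 3 (third conjunct supplied)
theorem eCond_break {arr : List Int} {beg j : Nat} (hbeg : beg < j) (_hjn : j ≤ arr.length)
    (hub : upF arr beg = false) (hrun : ∀ i, beg < i → i < j → upF arr i = true)
    (hthird : (decide (((j - 1 : Nat) : Int) = (arr.length : Int) - 1) || !upF arr ((j - 1) + 1)) = true) :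
    eCond arr (j - 1) = decide (3 ≤ j - beg) := by
  by_cases h3 : 3 ≤ j - beg
  · have hcast : ((j - 1 : Nat) : Int) - 1 = ((j - 2 : Nat) : Int) := by omega
    have h1 : upF arr (j - 1) = true := hrun _ (by omega) (by omega)
    have h2 : upF arr (j - 2) = true := hrun _ (by omega) (by omega)
    unfold eCond
    rw [hcast]
    simp [h1, hthird, show uget (upList arr) ((j - 2 : Nat) : Int) = upF arr (j - 2) from rfl, h2, h3]
  · have hlen : j - beg = 1 ∨ j - beg = 2 := by omega
    rcases hlen with hl | hl
    · have h1 : upF arr (j - 1) = false := by rwa [show j - 1 = beg by omega]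
      simp [eCond, h1, h3]
    · have hcast : ((j - 1 : Nat) : Int) - 1 = ((beg : Nat) : Int) := by omega
      unfold eCond
      rw [hcast]
      simp [show uget (upList arr) ((beg : Nat) : Int) = upF arr beg from rfl, hub, h3]

-- the main loop invariant: A's remaining fold computes the window comparison
theorem mainA (arr : List Int) :
    ∀ (tail : List Int) (j beg : Nat) (minE : Option Int) (maxB : Int),
      1 ≤ j → beg < j → j ≤ arr.length → arr.drop j = tail →
      upF arr beg = false → (∀ i, beg < i → i < j → upF arr i = true) →
      findA_final arr ((PySem.List.pyRange (j : Int) (arr.length : Int) 1).foldl (findA_step arr)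
          ((beg : Int), (j : Int) - 1, minE, maxB, (j : Int) - (beg : Int)))
        = gtInf ((sVals arr beg (arr.length - beg)).foldl max maxB)
                ((eVals arr (j - 1) (arr.length - (j - 1))).foldl minInf minE) := by
  intro tail
  induction tail with
  | nil =>
    intro j beg minE maxB hj hbeg hjn hdrop hub hrun
    have hjeq : j = arr.length := by
      have := List.drop_eq_nil_iff.mp hdrop; omega
    rw [PySem.List.pyRange_one_eq_nil (by omega)]
    simp only [List.foldl_nil]
    rw [sVals_split arr beg j arr.length hbeg hjn hrun,
        sCond_begin hbeg hjn hub hrun (Or.inl hjeq),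
        eVals_peel arr j arr.length hj hjn,
        eCond_break hbeg hjn hub hrun (by simp; omega)]
    have hse : sVals arr j (arr.length - j) = [] := by
      unfold sVals; rw [show arr.length - j = 0 by omega]; simp
    have hee : eVals arr j (arr.length - j) = [] := by
      unfold eVals; rw [show arr.length - j = 0 by omega]; simp
    rw [hse, hee]
    simp only [findA_final]
    by_cases h3 : 3 ≤ j - beg
    · rw [if_pos (by omega : ((j : Int) - (beg : Int)) > 2), if_pos (by omega : ((j : Int) - (beg : Int)) > 2)]
      simp [h3, show ((j - 1 : Nat) : Int) = (j : Int) - 1 by omega]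
    · rw [if_neg (by omega : ¬ ((j : Int) - (beg : Int)) > 2), if_neg (by omega : ¬ ((j : Int) - (beg : Int)) > 2)]
      simp [h3]
  | cons x xs ih =>
    intro j beg minE maxB hj hbeg hjn hdrop hub hrun
    have hjlt : j < arr.length := by
      have := congrArg List.length hdrop; simp [List.length_drop] at this; omega
    have hxs : arr.drop (j + 1) = xs := by
      have := congrArg List.tail hdrop; simpa [List.tail_drop] using this
    rw [PySem.List.pyRange_one_cons (by omega), List.foldl_cons]
    have hnth := upF_eq_of_lt (arr := arr) (i := j) hjlt
    by_cases hc : PySem.List.pyGetD arr (j : Int) 0 ≤ PySem.List.pyGetD arr ((j : Int) - 1) 0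
    · -- the run breaks at j
      have hupj : upF arr j = false := by
        rw [hnth, decide_eq_false (not_lt.mpr hc), Bool.and_false]
      have hstep : findA_step arr ((beg : Int), (j : Int) - 1, minE, maxB, (j : Int) - (beg : Int)) (j : Int)
          = (if 3 ≤ j - beg then
              ((j : Int), (j : Int), minInf minE (PySem.List.pyGetD arr ((j : Int) - 1) 0),
                max maxB (PySem.List.pyGetD arr (beg : Int) 0), 1)
             else ((j : Int), (j : Int), minE, maxB, 1)) := by
        simp only [findA_step]
        rw [if_pos hc]
        by_cases h3 : 3 ≤ j - beg
        · rw [if_pos (by omega : ((j : Int) - (beg : Int)) > 2), if_pos h3]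
        · rw [if_neg (by omega : ¬ ((j : Int) - (beg : Int)) > 2), if_neg h3]
      rw [hstep]
      have hIH : ∀ (minE' : Option Int) (maxB' : Int),
          findA_final arr ((PySem.List.pyRange ((j : Int) + 1) (arr.length : Int) 1).foldl (findA_step arr)
              ((j : Int), (j : Int), minE', maxB', 1))
            = gtInf ((sVals arr j (arr.length - j)).foldl max maxB')
                    ((eVals arr j (arr.length - j)).foldl minInf minE') := by
        intro minE' maxB'
        have h := ih (j + 1) j minE' maxB' (by omega) (by omega) (by omega) hxs hupj
          (fun i h1 h2 => absurd h2 (by omega))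
        rw [show ((j + 1 : Nat) : Int) = (j : Int) + 1 by push_cast; ring,
            show ((j : Int) + 1) - 1 = (j : Int) by ring,
            show ((j : Int) + 1) - (j : Int) = 1 by ring,
            show j + 1 - 1 = j from rfl] at h
        exact h
      rw [sVals_split arr beg j arr.length hbeg (le_of_lt hjlt) hrun,
          sCond_begin hbeg (le_of_lt hjlt) hub hrun (Or.inr hupj),
          eVals_peel arr j arr.length hj (le_of_lt hjlt),
          eCond_break hbeg (le_of_lt hjlt) hub hrun
            (by simp [show (j - 1) + 1 = j by omega, hupj])]
      by_cases h3 : 3 ≤ j - beg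
      · rw [if_pos h3, hIH]
        simp [h3, show ((j - 1 : Nat) : Int) = (j : Int) - 1 by omega]
      · rw [if_neg h3, hIH]
        simp [h3]
    · -- the run extends through j
      push Not at hc
      have hupj : upF arr j = true := by
        rw [hnth, decide_eq_true (show (0 : Int) < (j : Int) by omega), decide_eq_true hc]
        rfl
      have hstep : findA_step arr ((beg : Int), (j : Int) - 1, minE, maxB, (j : Int) - (beg : Int)) (j : Int)
          = ((beg : Int), ((j : Int) - 1) + 1, minE, maxB, ((j : Int) - (beg : Int)) + 1) := by
        simp only [findA_step]
        rw [if_neg (not_le.mpr hc)]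
      rw [hstep]
      have h := ih (j + 1) beg minE maxB (by omega) (by omega) (by omega) hxs hub
        (by
          intro i hi1 hi2
          by_cases hij : i = j
          · rw [hij]; exact hupj
          · exact hrun i hi1 (by omega))
      rw [show ((j + 1 : Nat) : Int) = (j : Int) + 1 by push_cast; ring,
          show ((j : Int) + 1) - 1 = ((j : Int) - 1) + 1 by ring,
          show ((j : Int) + 1) - (beg : Int) = ((j : Int) - (beg : Int)) + 1 by ring,
          show j + 1 - 1 = j from rfl] at h
      rw [h, eVals_peel arr j arr.length hj (le_of_lt hjlt)]
      have hec : eCond arr (j - 1) = false := by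
        unfold eCond
        have h1 : (decide (((j - 1 : Nat) : Int) = (arr.length : Int) - 1)) = false := by
          simp; omega
        have h2 : upF arr ((j - 1) + 1) = true := by
          rw [show (j - 1) + 1 = j by omega]; exact hupj
        simp [h1, h2]
      rw [hec]
      simp

-- B in window form
theorem altB (arr : List Int) :
    find_substrs_alt arr
      = gtInf ((sVals arr 0 arr.length).foldl max 0) ((eVals arr 0 arr.length).foldl minInf none) := by
  have hrange : PySem.List.pyRange 0 (arr.length : Int) 1
      = (List.range' 0 arr.length).map (fun (k : Nat) => (k : Int)) := by
    rw [PySem.List.pyRange_one, ← List.range_eq_range']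
    simp
  have hs : ((PySem.List.pyRange 0 (arr.length : Int) 1).filter (fun i =>
        !uget (upList arr) i && decide (i + 2 < (arr.length : Int)) &&
          uget (upList arr) (i + 1) && uget (upList arr) (i + 2))).map
        (fun i => PySem.List.pyGetD arr i 0) = sVals arr 0 arr.length := by
    rw [hrange, List.filter_map, List.map_map]
    unfold sVals
    congr 1
  have he : ((PySem.List.pyRange 0 (arr.length : Int) 1).filter (fun k =>
        uget (upList arr) k && uget (upList arr) (k - 1) &&
          (decide (k = (arr.length : Int) - 1) || !uget (upList arr) (k + 1)))).map
        (fun k => PySem.List.pyGetD arr k 0) = eVals arr 0 arr.length := by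
    rw [hrange, List.filter_map, List.map_map]
    unfold eVals
    congr 1
  simp only [find_substrs_alt]
  rw [hs, he]
  cases h : eVals arr 0 arr.length with
  | nil => simp [gtInf]
  | cons e es =>
    rw [List.foldl_cons, show minInf none e = some e from rfl, foldl_minInf_some]
    rfl

theorem find_substrs_eq (arr : List Int) : find_substrs arr = find_substrs_alt arr := by
  cases arr with
  | nil => rfl
  | cons x xs =>
    have h := mainA (x :: xs) xs 1 0 none 0 (by omega) (by omega) (by simp) rfl
      (upF_zero _) (by omega)
    norm_num at h
    unfold find_substrs
    simp only [List.length_cons, Nat.cast_add, Nat.cast_one] at *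
    rw [h, altB]
    simp

-- ===== VERDICT (by name: the statement is the Claim_ definition above) =====
theorem find_substrs_spec : Claim_equal_find_substrs := by
  intro arr _
  unfold Spec_find_substrs
  exact find_substrs_eq arr
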